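-- pv_equiv track=rewrite | github.com/CarolMeraIbarra/PruebaExamVer1 | funciones/frecuencia_absoluta_c.py | frecuencia_absoluta_c
-- ===== SOURCE A (Python) =====
-- def frecuencia_absoluta_c(datos_ordenados):
--     categorias = []
--     frecuencias = []
--     for dato in datos_ordenados:
--         if dato in categorias:
--             index = categorias.index(dato)
--             frecuencias[index] += 1
--         else:
--             categorias.append(dato)
--             frecuencias.append(1)
--     return categorias, frecuencias
-- ===== SOURCE B (Python) =====
-- def frecuencia_absoluta_c(datos_ordenados):
--     categorias = list(dict.fromkeys(datos_ordenados))
--     frecuencias = [datos_ordenados.count(c) for c in categorias]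
--     return categorias, frecuencias
-- ===== Notes on version B (the rewrite author's own statement) =====
-- stated objective: simpler
-- what changed: Replaces A's single incremental pass maintaining two parallel lists (with in-place index lookup and increment) by two independent traversals: an order-preserving dedup builds the category list, then each frequency is computed by counting over the whole input.
import Mathlib
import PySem

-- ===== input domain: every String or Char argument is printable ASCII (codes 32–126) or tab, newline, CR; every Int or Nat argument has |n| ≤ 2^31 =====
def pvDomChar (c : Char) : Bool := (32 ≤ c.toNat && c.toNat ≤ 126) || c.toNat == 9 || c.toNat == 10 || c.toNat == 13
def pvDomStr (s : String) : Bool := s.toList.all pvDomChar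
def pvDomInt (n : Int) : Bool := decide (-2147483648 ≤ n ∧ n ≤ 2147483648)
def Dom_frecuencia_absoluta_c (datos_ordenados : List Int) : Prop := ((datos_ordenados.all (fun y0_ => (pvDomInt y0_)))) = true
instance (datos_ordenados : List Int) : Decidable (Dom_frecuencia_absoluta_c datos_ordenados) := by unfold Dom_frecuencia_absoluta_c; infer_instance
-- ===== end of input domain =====

-- B replaces A's single incremental pass over two parallel lists by an order-preserving dedup
-- followed by a separate counting pass (objective: simpler).

-- ===== PORT A =====
-- one loop iteration of A: membership test, index lookup, in-place increment / append
def pvStepA (st : List Int × List Int) (dato : Int) : List Int × List Int :=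
  if dato ∈ st.1 then
    match PySem.List.index? st.1 dato with
    | some i => (st.1, st.2.set i (st.2.getD i 0 + 1))
    | none => st          -- unreachable: dato ∈ st.1 guarantees index? succeeds
  else (st.1 ++ [dato], st.2 ++ [1])

def frecuencia_absoluta_c (datos_ordenados : List Int) : List Int × List Int :=
  datos_ordenados.foldl pvStepA ([], [])

-- ===== PORT B =====
def frecuencia_absoluta_c_alt (datos_ordenados : List Int) : List Int × List Int :=
  let categorias := PySem.List.dedup datos_ordenados
  let frecuencias := categorias.map (fun c => (PySem.List.count datos_ordenados c : Int))
  (categorias, frecuencias)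

-- ===== PRECONDITION & SPEC =====
def Spec_frecuencia_absoluta_c (datos_ordenados : List Int) (out : List Int × List Int) : Prop := out = frecuencia_absoluta_c_alt datos_ordenados
instance (datos_ordenados : List Int) (out : List Int × List Int) : Decidable (Spec_frecuencia_absoluta_c datos_ordenados out) := by unfold Spec_frecuencia_absoluta_c; infer_instance

-- ===== CLAIM (what is proved, stated in full; the proofs are below) =====
def Claim_equal_frecuencia_absoluta_c : Prop := ∀ (datos_ordenados : List Int), Dom_frecuencia_absoluta_c datos_ordenados → Spec_frecuencia_absoluta_c datos_ordenados (frecuencia_absoluta_c datos_ordenados)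

-- ===== LEMMAS AND PROOFS =====

theorem pv_dedup_append_singleton (pre : List Int) (x : Int) :
    PySem.List.dedup (pre ++ [x]) = if x ∈ pre then PySem.List.dedup pre else PySem.List.dedup pre ++ [x] := by
  simp only [PySem.List.dedup_eq_ofList, PySem.Set.ofList_eq_foldl, List.foldl_append,
    List.foldl_cons, List.foldl_nil]
  rw [← PySem.Set.ofList_eq_foldl, PySem.Set.add]
  simp [PySem.Set.mem_ofList, PySem.Set.contains]

theorem pv_count_append_singleton (pre : List Int) (x c : Int) :
    ((pre ++ [x]).count c : Int) = (pre.count c : Int) + if c = x then 1 else 0 := by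
  by_cases h : c = x
  · simp [List.count_append, h]
  · simp [List.count_append, h, Ne.symm h]

theorem pv_set_map_at (p s : List Int) (x : Int) (f : Int → Int)
    (hxp : x ∉ p) (hxs : x ∉ s) :
    (((p ++ x :: s).map f).set p.length (((p ++ x :: s).map f).getD p.length 0 + 1)) =
      (p ++ x :: s).map (fun c => f c + if c = x then 1 else 0) := by
  have hget : ((p ++ x :: s).map f).getD p.length 0 = f x := by
    simp [List.getD, List.map_append]
  rw [hget, List.map_append, List.map_cons, List.set_append_right _ _ (by simp)]
  simp only [List.length_map, Nat.sub_self, List.set_cons_zero]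
  rw [List.map_append, List.map_cons]
  congr 1
  · exact List.map_congr_left fun c hc => by
      have : c ≠ x := fun e => hxp (e ▸ hc); simp [this]
  · congr 1
    · simp
    · exact List.map_congr_left fun c hc => by
        have : c ≠ x := fun e => hxs (e ▸ hc); simp [this]

theorem pv_stepA_inv (pre : List Int) (x : Int) :
    pvStepA (PySem.List.dedup pre, (PySem.List.dedup pre).map (fun c => (pre.count c : Int))) x =
      (PySem.List.dedup (pre ++ [x]),
        (PySem.List.dedup (pre ++ [x])).map (fun c => ((pre ++ [x]).count c : Int))) := by
  have hfun : (fun c => (((pre ++ [x]).count c : Int))) =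
      fun c => ((pre.count c : Int) + if c = x then 1 else 0) :=
    funext (pv_count_append_singleton pre x)
  by_cases hx : x ∈ pre
  · have hmem : x ∈ PySem.List.dedup pre := (PySem.List.mem_dedup _ _).mpr hx
    have hk : ∃ k, PySem.List.index? (PySem.List.dedup pre) x = some k :=
      Option.isSome_iff_exists.mp ((PySem.List.index?_isSome_iff _ _).mpr hmem)
    obtain ⟨k, hk⟩ := hk
    obtain ⟨p, s, hdecomp, hlen, hxp⟩ := (PySem.List.index?_eq_some_iff _ _ _).mp hk
    have hnd : (PySem.List.dedup pre).Nodup := PySem.List.nodup_dedup pre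
    have hxs : x ∉ s := by
      rw [hdecomp] at hnd
      have := (List.nodup_append.mp hnd).2.1
      exact (List.nodup_cons.mp this).1
    rw [pv_dedup_append_singleton, if_pos hx, hfun]
    unfold pvStepA
    simp only [hmem, if_pos, hk]
    refine Prod.ext rfl ?_
    simp only
    rw [hdecomp, ← hlen]
    exact pv_set_map_at p s x _ hxp hxs
  · have hmem : x ∉ PySem.List.dedup pre := fun h => hx ((PySem.List.mem_dedup _ _).mp h)
    rw [pv_dedup_append_singleton, if_neg hx, hfun]
    unfold pvStepA
    simp only [hmem, if_false]
    refine Prod.ext rfl ?_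
    simp only [List.map_append, List.map_cons, List.map_nil]
    congr 1
    · exact (List.map_congr_left fun c hc => by
        have : c ≠ x := fun e => hx (e ▸ (PySem.List.mem_dedup _ _).mp hc)
        simp [this]).symm
    · have : pre.count x = 0 := List.count_eq_zero.mpr hx
      simp [this]

theorem pv_foldl_inv (xs pre : List Int) :
    xs.foldl pvStepA (PySem.List.dedup pre, (PySem.List.dedup pre).map (fun c => (pre.count c : Int))) =
      (PySem.List.dedup (pre ++ xs),
        (PySem.List.dedup (pre ++ xs)).map (fun c => ((pre ++ xs).count c : Int))) := by
  induction xs generalizing pre with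
  | nil => simp
  | cons x xs ih =>
      rw [List.foldl_cons, pv_stepA_inv, ih (pre ++ [x])]
      simp

-- ===== VERDICT (by name: the statement is the Claim_ definition above) =====
theorem frecuencia_absoluta_c_spec : Claim_equal_frecuencia_absoluta_c := by
  intro xs _
  unfold Spec_frecuencia_absoluta_c frecuencia_absoluta_c frecuencia_absoluta_c_alt
  have h := pv_foldl_inv xs []
  simpa [PySem.List.count_eq] using h
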